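-- pv_equiv track=rewrite | github.com/huaszu/go-fish | logic.py | assemble_books_of_all_players
-- ===== SOURCE A (Python) =====
-- def get_hand_of_player(player, players, hands):
--     index_in_players = players.index(player)
--     index_in_hands = index_in_players
--     hand = hands[index_in_hands]
--
--     return hand
--
-- def get_rank_counts_of_hand(hand):
--     rank_counts: dict[str, int] = dict()
--
--     for card_rank in hand:
--         rank_counts[card_rank] = rank_counts.get(card_rank, 0) + 1
--
--     return rank_counts
--
-- def get_books_from_rank_counts(rank_counts):
--     player_books = []
--
--     for card_rank, count in rank_counts.items():
--         if count == 4: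
--             player_books.append(card_rank)
--
--     return player_books
--
-- def assemble_books_of_all_players(players, hands):
--     # Dictionary showing each player and that player's number of books
--     books_status: dict[str: int] = dict()
--
--     for player in players:
--         hand = get_hand_of_player(player=player, players=players, hands=hands)
--         rank_counts = get_rank_counts_of_hand(hand=hand)
--         books = get_books_from_rank_counts(rank_counts=rank_counts)
--         num_books = len(books)
--
--         books_status[player] = len(books)
--
--     return books_status
-- ===== SOURCE B (Python) =====
-- def assemble_books_of_all_players(players, hands):
--     # Books are counted by sorting a copy of each hand and scanning maximal runs
--     # of equal ranks, instead of building a rank-frequency dictionary.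
--     books_status = {}
--     for player in players:
--         hand = hands[players.index(player)]
--         books = 0
--         run = 0
--         prev = None
--         for rank in sorted(hand):
--             if run and rank == prev:
--                 run += 1
--             else:
--                 if run == 4:
--                     books += 1
--                 run = 1
--                 prev = rank
--         if run == 4:
--             books += 1
--         books_status[player] = books
--     return books_status
-- ===== Notes on version B (the rewrite author's own statement) =====
-- stated objective: alternative
-- what changed: Per-player book counting no longer builds a rank-frequency dictionary and filters it; instead each hand is sorted (a copy) and a single pass counts maximal runs of equal ranks, incrementing the book count for each run of length exactly 4.
import Mathlib
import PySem

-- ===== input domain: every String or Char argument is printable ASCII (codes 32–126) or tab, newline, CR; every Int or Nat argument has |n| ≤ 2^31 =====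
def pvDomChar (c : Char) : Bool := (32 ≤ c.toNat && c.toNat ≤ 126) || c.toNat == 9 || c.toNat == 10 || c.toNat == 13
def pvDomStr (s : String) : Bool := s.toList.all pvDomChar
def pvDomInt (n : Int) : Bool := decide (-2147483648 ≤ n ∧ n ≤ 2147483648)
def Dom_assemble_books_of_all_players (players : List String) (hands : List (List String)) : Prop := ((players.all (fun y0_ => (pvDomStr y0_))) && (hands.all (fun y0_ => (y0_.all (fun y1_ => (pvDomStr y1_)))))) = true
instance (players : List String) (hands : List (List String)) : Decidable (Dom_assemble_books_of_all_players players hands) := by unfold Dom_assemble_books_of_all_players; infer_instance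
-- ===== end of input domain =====

-- B replaces A's per-hand rank-frequency dictionary by sorting a copy of the hand and
-- scanning runs of equal ranks (alternative decomposition; not claimed faster).

-- ===== PORT A =====
-- players.index(player) never raises at A's call sites (player ∈ players); the .getD 0 is
-- unreachable there.  hands[i] can raise IndexError — excluded by Pre_ below.
def pvGetHandOfPlayer (player : String) (players : List String) (hands : List (List String)) : List String :=
  let index_in_players := (PySem.List.index? players player).getD 0
  let index_in_hands := index_in_players
  PySem.List.pyGetD hands (index_in_hands : Int) []

def pvGetRankCountsOfHand (hand : List String) : PySem.Dict String Int :=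
  hand.foldl (fun rank_counts card_rank =>
    rank_counts.insert card_rank (rank_counts.getD card_rank 0 + 1)) PySem.Dict.empty

def pvGetBooksFromRankCounts (rank_counts : PySem.Dict String Int) : List String :=
  rank_counts.items.foldl (fun player_books kv =>
    if kv.2 = 4 then player_books ++ [kv.1] else player_books) []

def assemble_books_of_all_players (players : List String) (hands : List (List String)) : List (String × Int) :=
  (players.foldl (fun books_status player =>
      let hand := pvGetHandOfPlayer player players hands
      let books := pvGetBooksFromRankCounts (pvGetRankCountsOfHand hand)
      books_status.insert player (books.length : Int))
    (PySem.Dict.empty : PySem.Dict String Int)).items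

-- ===== PORT B =====
-- one step of B's run scan over the sorted hand: state = (books, run, prev)
def pvRunStep (st : Int × Nat × Option String) (rank : String) : Int × Nat × Option String :=
  if st.2.1 ≠ 0 ∧ some rank = st.2.2 then (st.1, st.2.1 + 1, st.2.2)
  else ((if st.2.1 = 4 then st.1 + 1 else st.1), 1, some rank)

def pvCountBooksSorted (hand : List String) : Int :=
  let st := (PySem.List.sorted hand (fun x => x) false).foldl pvRunStep (0, 0, none)
  if st.2.1 = 4 then st.1 + 1 else st.1

def assemble_books_of_all_players_alt (players : List String) (hands : List (List String)) : List (String × Int) :=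
  (players.foldl (fun books_status player =>
      let hand := PySem.List.pyGetD hands (((PySem.List.index? players player).getD 0 : Nat) : Int) []
      books_status.insert player (pvCountBooksSorted hand))
    (PySem.Dict.empty : PySem.Dict String Int)).items

-- ===== PRECONDITION & SPEC =====
-- Pre_ excludes exactly the inputs on which A raises IndexError: some player's first index
-- in players is not a valid index into hands.  (B raises there too.)
def Pre_assemble_books_of_all_players (players : List String) (hands : List (List String)) : Prop :=
  ∀ p ∈ players, (PySem.List.index? players p).getD 0 < hands.length

instance (players : List String) (hands : List (List String)) : Decidable (Pre_assemble_books_of_all_players players hands) := by unfold Pre_assemble_books_of_all_players; infer_instance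

def pvWitness_assemble_books_of_all_players : List String × List (List String) :=
  (["a", "b"], [["x", "x", "x", "x", "y"], ["y", "y"]])

def Spec_assemble_books_of_all_players (players : List String) (hands : List (List String)) (out : List (String × Int)) : Prop := out = assemble_books_of_all_players_alt players hands
instance (players : List String) (hands : List (List String)) (out : List (String × Int)) : Decidable (Spec_assemble_books_of_all_players players hands out) := by unfold Spec_assemble_books_of_all_players; infer_instance

-- ===== CLAIM (what is proved, stated in full; the proofs are below) =====
def Claim_equal_assemble_books_of_all_players : Prop := ∀ (players : List String) (hands : List (List String)), Dom_assemble_books_of_all_players players hands → Pre_assemble_books_of_all_players players hands → Spec_assemble_books_of_all_players players hands (assemble_books_of_all_players players hands)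

-- ===== LEMMAS AND PROOFS =====

-- number of distinct values of s occurring exactly 4 times (the common specification)
def pvCF (s : List String) : Nat :=
  (PySem.List.dedup s).countP (fun k => s.count k == 4)

theorem pvCF_perm {s s' : List String} (h : s.Perm s') : pvCF s = pvCF s' := by
  unfold pvCF
  have hd : (PySem.List.dedup s).Perm (PySem.List.dedup s') := by
    rw [List.perm_ext_iff_of_nodup (PySem.List.nodup_dedup s) (PySem.List.nodup_dedup s')]
    intro a
    simp [h.mem_iff]
  calc (PySem.List.dedup s).countP (fun k => s.count k == 4)
      = (PySem.List.dedup s).countP (fun k => s'.count k == 4) := by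
        apply List.countP_congr
        intro k _
        simp [h.count_eq]
    _ = (PySem.List.dedup s').countP (fun k => s'.count k == 4) := hd.countP_eq _

theorem pvCF_cons (x : String) (t : List String) :
    pvCF (x :: t) = (if t.count x + 1 = 4 then 1 else 0) + pvCF (t.filter (fun y => y ≠ x)) := by
  unfold pvCF
  have hperm : (PySem.List.dedup (x :: t)).Perm (x :: PySem.List.dedup (t.filter (fun y => y ≠ x))) := by
    rw [List.perm_ext_iff_of_nodup (PySem.List.nodup_dedup _) ?_]
    · intro a
      by_cases hax : a = x <;>
        simp [List.mem_filter, hax]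
    · refine List.nodup_cons.2 ⟨?_, PySem.List.nodup_dedup _⟩
      intro hx
      rw [PySem.List.mem_dedup] at hx
      simp at hx
  rw [hperm.countP_eq, List.countP_cons]
  have hrest : (PySem.List.dedup (t.filter (fun y => y ≠ x))).countP (fun k => (x :: t).count k == 4)
      = (PySem.List.dedup (t.filter (fun y => y ≠ x))).countP (fun k => (t.filter (fun y => y ≠ x)).count k == 4) := by
    apply List.countP_congr
    intro k hk
    rw [PySem.List.mem_dedup, List.mem_filter] at hk
    have hkx : k ≠ x := by simpa using hk.2
    rw [List.count_cons_of_ne (Ne.symm hkx), List.count_filter (by simpa using hkx)]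
  rw [hrest]
  simp only [List.count_cons_self]
  by_cases h4 : t.count x + 1 = 4 <;> simp [h4, Nat.add_comm]
  omega

-- A's per-hand value is pvCF
theorem pvA_hand (hand : List String) :
    ((pvGetBooksFromRankCounts (pvGetRankCountsOfHand hand)).length : Int) = (pvCF hand : Int) := by
  have hc : pvGetRankCountsOfHand hand = PySem.Dict.counter hand :=
    PySem.Dict.foldl_insert_getD_add_one_eq_counter hand
  unfold pvGetBooksFromRankCounts
  rw [hc]
  have hfun : (fun (pb : List String) (kv : String × Int) => if kv.2 = 4 then pb ++ [kv.1] else pb)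
      = (fun pb kv => if (fun kv : String × Int => kv.2 == 4) kv then pb ++ [(fun kv : String × Int => kv.1) kv] else pb) := by
    funext pb kv; simp
  rw [hfun, PySem.List.foldl_append_if, PySem.Dict.items_counter]
  simp only [List.nil_append, List.length_map]
  rw [← List.countP_eq_length_filter, List.countP_map]
  unfold pvCF
  rw [PySem.List.dedup_eq_ofList]
  congr 1
  apply List.countP_congr
  intro k _
  simp [Function.comp]
  omega

-- B's run scan, after the first element has been consumed
theorem pvScan (s : List String) (hs : s.Pairwise (· ≤ ·)) :
    ∀ (b : Int) (r : Nat) (p : String), 1 ≤ r → (∀ y ∈ s, p ≤ y) →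
      (if (s.foldl pvRunStep (b, r, some p)).2.1 = 4 then (s.foldl pvRunStep (b, r, some p)).1 + 1
       else (s.foldl pvRunStep (b, r, some p)).1)
      = b + (if r + s.count p = 4 then 1 else 0) + (pvCF (s.filter (fun y => y ≠ p)) : Int) := by
  induction s with
  | nil =>
    intro b r p _ _
    simp [pvCF]
    split_ifs <;> simp_all
  | cons x t ih =>
    intro b r p hr hle
    have hx_le : p ≤ x := hle x (by simp)
    have ht_le : ∀ y ∈ t, x ≤ y := (List.pairwise_cons.1 hs).1
    by_cases hxp : x = p
    · subst hxp
      have hstep : pvRunStep (b, r, some x) x = (b, r + 1, some x) := by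
        unfold pvRunStep
        simp
        omega
      rw [List.foldl_cons, hstep]
      rw [ih (List.pairwise_cons.1 hs).2 b (r + 1) x (by omega)
            (fun y hy => le_trans hx_le (ht_le y hy))]
      have hcnt : (x :: t).count x = t.count x + 1 := List.count_cons_self
      have hfil : (x :: t).filter (fun y => y ≠ x) = t.filter (fun y => y ≠ x) := by
        simp
      rw [hcnt, hfil]
      have harith : r + 1 + t.count x = r + (t.count x + 1) := by omega
      rw [harith]
    · have hstep : pvRunStep (b, r, some p) x = ((if r = 4 then b + 1 else b), 1, some x) := by
        unfold pvRunStep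
        simp [hxp]
      rw [List.foldl_cons, hstep]
      rw [ih (List.pairwise_cons.1 hs).2 (if r = 4 then b + 1 else b) 1 x (by omega) ht_le]
      have hpx : p < x := lt_of_le_of_ne hx_le (fun h => hxp h.symm)
      have hpt : p ∉ (x :: t) := by
        intro hmem
        rcases List.mem_cons.1 hmem with h | h
        · exact hxp h.symm
        · exact absurd (lt_of_lt_of_le hpx (ht_le p h)) (lt_irrefl p)
      have hcnt : (x :: t).count p = 0 := List.count_eq_zero.2 hpt
      have hfil : (x :: t).filter (fun y => y ≠ p) = x :: t := by
        rw [List.filter_eq_self]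
        intro y hy
        simp only [ne_eq, decide_eq_true_eq]
        intro hyp
        subst hyp
        exact hpt hy
      rw [hcnt, hfil]
      have hcf := pvCF_cons x t
      rw [hcf]
      push_cast
      split_ifs <;> omega

-- B's per-hand value is pvCF
theorem pvB_hand (hand : List String) : pvCountBooksSorted hand = (pvCF hand : Int) := by
  unfold pvCountBooksSorted
  have hperm : (PySem.List.sorted hand (fun x => x) false).Perm hand :=
    PySem.List.sorted_perm hand (fun x => x) false
  rcases hS : PySem.List.sorted hand (fun x => x) false with _ | ⟨x, t⟩
  · have h0 : hand = [] := (PySem.List.sorted_eq_nil_iff hand (fun x => x) false).1 hS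
    subst h0
    simp [pvCF]
  · have hpw : (x :: t).Pairwise (· ≤ ·) := by
      have := PySem.List.sorted_pairwise hand (fun x => x)
      rw [hS] at this
      exact this
    have hstep0 : pvRunStep (0, 0, none) x = (0, 1, some x) := by
      unfold pvRunStep
      simp
    rw [List.foldl_cons, hstep0]
    rw [pvScan t (List.pairwise_cons.1 hpw).2 0 1 x (by omega) (List.pairwise_cons.1 hpw).1]
    have hcf : pvCF hand = pvCF (x :: t) := by
      apply pvCF_perm
      rw [← hS]
      exact hperm.symm
    rw [hcf, pvCF_cons]
    push_cast
    split_ifs <;> omega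

theorem assemble_books_of_all_players_spec : Claim_equal_assemble_books_of_all_players := by
  unfold Claim_equal_assemble_books_of_all_players
  intro players hands _ _
  unfold Spec_assemble_books_of_all_players
  simp only [assemble_books_of_all_players, assemble_books_of_all_players_alt, pvGetHandOfPlayer]
  have hfg : (fun (books_status : PySem.Dict String Int) (player : String) =>
        books_status.insert player
          ((pvGetBooksFromRankCounts (pvGetRankCountsOfHand
              (PySem.List.pyGetD hands (((PySem.List.index? players player).getD 0 : Nat) : Int) []))).length : Int))
      = (fun (books_status : PySem.Dict String Int) (player : String) =>
        books_status.insert player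
          (pvCountBooksSorted (PySem.List.pyGetD hands (((PySem.List.index? players player).getD 0 : Nat) : Int) []))) := by
    funext bs player
    rw [pvA_hand, pvB_hand]
  rw [hfg]
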